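-- pv_equiv track=rewrite | github.com/SonodaKazuto/OnlineJudge_answer_set | UVa_12019_Dooms_Day_Algorithm.py | weekdayChecker
-- ===== SOURCE A (Python) =====
-- def weekdayChecker(_month_, _day_):
--     m = [i for i in range(1, 13)]
--     d = [10, 21, 7, 4, 9, 6, 11, 8, 5, 10, 7, 12]
--     dooms = dict(zip(m, d))
--     weekdays = ["Monday", "Tuesday", "Wednesday", "Thursday", "Friday", "Saturday", "Sunday"]
--
--     weekday = 1
--     tmp = _day_ - dooms[_month_]
--     if tmp >= 0 :
--         weekday += tmp % 7
--     else :
--         weekday -= abs(tmp) % 7 - 7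
--         weekday %= 7
--
--     return weekdays[weekday-1]
-- ===== SOURCE B (Python) =====
-- def weekdayChecker(_month_, _day_):
--     offsets = [10, 21, 7, 4, 9, 6, 11, 8, 5, 10, 7, 12]
--     weekdays = ["Monday", "Tuesday", "Wednesday", "Thursday", "Friday", "Saturday", "Sunday"]
--     table = []
--     for o in offsets:
--         r = -o % 7
--         table.append(weekdays[r:] + weekdays[:r])
--     return table[_month_ - 1][_day_ % 7]
-- ===== Notes on version B (the rewrite author's own statement) =====
-- stated objective: alternative
-- what changed: Replaces A's dict lookup plus two-branch signed-offset arithmetic with a precomputed 12x7 table of rotated weekday rows (each month's row is the weekday list rotated by its doomsday offset), so the answer is a direct table[month-1][day % 7] lookup with no subtraction or sign handling.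
-- outside the precondition, e.g. on weekdayChecker(13, 5): A raises KeyError, B raises IndexError
import Mathlib
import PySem

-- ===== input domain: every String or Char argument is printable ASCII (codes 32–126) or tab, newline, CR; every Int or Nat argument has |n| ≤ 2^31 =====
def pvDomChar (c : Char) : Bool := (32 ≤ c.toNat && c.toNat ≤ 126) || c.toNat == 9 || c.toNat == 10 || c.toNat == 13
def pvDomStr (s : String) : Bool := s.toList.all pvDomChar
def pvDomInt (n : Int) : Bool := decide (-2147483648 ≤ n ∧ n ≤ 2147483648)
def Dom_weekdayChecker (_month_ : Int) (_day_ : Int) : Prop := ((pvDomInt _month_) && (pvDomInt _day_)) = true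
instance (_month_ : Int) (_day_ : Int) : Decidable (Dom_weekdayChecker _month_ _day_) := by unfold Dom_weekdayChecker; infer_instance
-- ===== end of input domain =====

-- B replaces A's offset arithmetic and two-branch sign handling by a precomputed 12x7 table of
-- rotated weekday rows, indexed by month and day % 7; objective: alternative (table lookup).


-- ===== PORT A =====
def weekdayChecker (_month_ : Int) (_day_ : Int) : String :=
  let m : List Int := PySem.List.pyRange 1 13 1
  let d : List Int := [10, 21, 7, 4, 9, 6, 11, 8, 5, 10, 7, 12]
  let dooms : PySem.Dict Int Int := PySem.Dict.ofList (m.zip d)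
  let weekdays : List String :=
    ["Monday", "Tuesday", "Wednesday", "Thursday", "Friday", "Saturday", "Sunday"]
  let weekday : Int := 1
  -- dooms[_month_]: KeyError (none) excluded by Pre_weekdayChecker
  let tmp : Int := _day_ - ((dooms.get? _month_).getD 0)
  let weekday : Int :=
    if tmp ≥ 0 then weekday + PySem.Int.mod tmp 7
    else PySem.Int.mod (weekday - (PySem.Int.mod |tmp| 7 - 7)) 7
  -- weekdays[weekday-1]: index always in range here (possibly -1, Python wraparound)
  (PySem.List.pyGet? weekdays (weekday - 1)).getD ""

-- ===== PORT B =====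
def weekdayChecker_alt (_month_ : Int) (_day_ : Int) : String :=
  let offsets : List Int := [10, 21, 7, 4, 9, 6, 11, 8, 5, 10, 7, 12]
  let weekdays : List String :=
    ["Monday", "Tuesday", "Wednesday", "Thursday", "Friday", "Saturday", "Sunday"]
  let table : List (List String) := offsets.foldl (fun acc o =>
    let r : Int := PySem.Int.mod (-o) 7
    acc ++ [PySem.List.slice weekdays (some r) none ++ PySem.List.slice weekdays none (some r)]) []
  -- table[_month_-1][_day_%7]: month index out of range excluded by Pre_weekdayChecker
  (PySem.List.pyGet?
    ((PySem.List.pyGet? table (_month_ - 1)).getD [])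
    (PySem.Int.mod _day_ 7)).getD ""

-- ===== PRECONDITION & SPEC =====
-- A raises KeyError for a month outside 1..12 (missing dict key); those inputs are excluded.
def Pre_weekdayChecker (_month_ : Int) (_day_ : Int) : Prop := 1 ≤ _month_ ∧ _month_ ≤ 12
instance (_month_ : Int) (_day_ : Int) : Decidable (Pre_weekdayChecker _month_ _day_) := by
  unfold Pre_weekdayChecker; infer_instance

def pvWitness_weekdayChecker : Int × Int := (3, 17)

def Spec_weekdayChecker (_month_ : Int) (_day_ : Int) (out : String) : Prop :=
  out = weekdayChecker_alt _month_ _day_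
instance (_month_ : Int) (_day_ : Int) (out : String) :
    Decidable (Spec_weekdayChecker _month_ _day_ out) := by
  unfold Spec_weekdayChecker; infer_instance

-- ===== CLAIM (what is proved, stated in full; the proofs are below) =====
def Claim_equal_weekdayChecker : Prop := ∀ (_month_ : Int) (_day_ : Int),
  Dom_weekdayChecker _month_ _day_ → Pre_weekdayChecker _month_ _day_ →
  Spec_weekdayChecker _month_ _day_ (weekdayChecker _month_ _day_)

-- ===== LEMMAS AND PROOFS =====

-- A's branchy one-based index into the weekday list equals a single Python modulo index.
theorem weekdayChecker_core (t : Int) :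
    (PySem.List.pyGet?
        ["Monday", "Tuesday", "Wednesday", "Thursday", "Friday", "Saturday", "Sunday"]
        ((if t ≥ 0 then 1 + PySem.Int.mod t 7
          else PySem.Int.mod (1 - (PySem.Int.mod |t| 7 - 7)) 7) - 1)).getD ""
      = (PySem.List.pyGet?
        ["Monday", "Tuesday", "Wednesday", "Thursday", "Friday", "Saturday", "Sunday"]
        (PySem.Int.mod t 7)).getD "" := by
  rw [PySem.Int.mod_eq_emod_of_pos (a := t) (by norm_num)]
  split_ifs with h
  · ring_nf
  · rw [abs_of_neg (by omega), PySem.Int.mod_eq_emod_of_pos (by norm_num),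
        PySem.Int.mod_eq_emod_of_pos (by norm_num)]
    have h0 : 0 ≤ t % 7 := Int.emod_nonneg t (by norm_num)
    have h7 : t % 7 < 7 := Int.emod_lt_of_pos t (by norm_num)
    have hneg : (-t) % 7 = (7 - t % 7) % 7 := by omega
    rw [hneg]
    rcases Int.lt_or_le (t % 7) 6 with h6 | h6
    · have : (1 - ((7 - t % 7) % 7 - 7)) % 7 = t % 7 + 1 := by omega
      rw [this]; ring_nf
    · have ht6 : t % 7 = 6 := by omega
      have : (1 - ((7 - t % 7) % 7 - 7)) % 7 = 0 := by omega
      rw [this, ht6]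
      norm_num
      rw [PySem.List.pyGet?_neg_one]
      rfl

theorem residue7 (d : Int) :
    d % 7 = 0 ∨ d % 7 = 1 ∨ d % 7 = 2 ∨ d % 7 = 3 ∨ d % 7 = 4 ∨ d % 7 = 5 ∨ d % 7 = 6 := by
  omega

-- ===== VERDICT (by name: the statement is the Claim_ definition above) =====
theorem weekdayChecker_spec : Claim_equal_weekdayChecker := by
  intro m d _ hpre
  obtain ⟨h1, h2⟩ := hpre
  unfold Spec_weekdayChecker weekdayChecker weekdayChecker_alt
  interval_cases m <;>
    (simp only [PySem.List.pyRange, PySem.Dict.ofList, PySem.Dict.get?]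
     rw [weekdayChecker_core]
     simp only [PySem.Int.mod_eq_emod_of_pos (b := 7) (by norm_num)]
     rw [Int.sub_emod]
     rcases residue7 d with h | h | h | h | h | h | h <;> rw [h] <;> decide)
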